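-- pv_equiv track=rewrite | github.com/IrinaAlBa/dsde1-computing1 | Week-4/structures.py | repeat_at_index
-- ===== SOURCE A (Python) =====
-- def repeat_at_index(the_list, index):
--     """This function inserts two times the same value into the list."""
--     n_times = 2
--     value = the_list[index]
--     new_list = the_list.copy()
--     while n_times > 0:
--         new_list.insert(index, value)
--         n_times -= 1
--     return new_list
-- ===== SOURCE B (Python) =====
-- def repeat_at_index(the_list, index):
--     """Insert the element at `index` twice at that position (slice-and-concatenate)."""
--     value = the_list[index]
--     return the_list[:index] + [value, value] + the_list[index:]
-- ===== Notes on version B (the rewrite author's own statement) =====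
-- stated objective: simpler
-- what changed: Replaces the copy plus counted while-loop of repeated list.insert calls with a single slice-and-concatenate expression built in one pass.
import Mathlib
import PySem

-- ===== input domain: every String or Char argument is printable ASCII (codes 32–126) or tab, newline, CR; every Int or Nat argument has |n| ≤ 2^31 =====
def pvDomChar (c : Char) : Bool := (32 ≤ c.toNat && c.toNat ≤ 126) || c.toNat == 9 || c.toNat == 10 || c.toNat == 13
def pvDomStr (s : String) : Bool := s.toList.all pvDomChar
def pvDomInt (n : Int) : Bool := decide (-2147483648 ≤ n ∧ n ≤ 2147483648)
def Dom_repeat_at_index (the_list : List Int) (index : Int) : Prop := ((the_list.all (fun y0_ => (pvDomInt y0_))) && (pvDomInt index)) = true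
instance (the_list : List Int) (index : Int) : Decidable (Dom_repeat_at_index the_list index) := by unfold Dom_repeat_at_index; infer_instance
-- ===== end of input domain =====

-- B replaces A's copy + counted while-loop of list.insert calls with a single
-- slice-and-concatenate expression (objective: simpler).


-- ===== PORT A =====
-- the 'while n_times > 0' loop, as structural recursion on n_times
def pvInsertLoop (index : Int) (value : Int) : Nat → List Int → List Int
  | 0, new_list => new_list
  | n + 1, new_list => pvInsertLoop index value n (PySem.List.insert new_list index value)

def repeat_at_index (the_list : List Int) (index : Int) : List Int :=
  let value := PySem.List.pyGetD the_list index 0   -- the_list[index]; total under Pre_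
  let new_list := the_list
  pvInsertLoop index value 2 new_list

-- ===== PORT B =====
def repeat_at_index_alt (the_list : List Int) (index : Int) : List Int :=
  let value := PySem.List.pyGetD the_list index 0   -- the_list[index]; total under Pre_
  PySem.List.slice the_list none (some index) ++ [value, value] ++
    PySem.List.slice the_list (some index) none

-- ===== PRECONDITION & SPEC =====
-- Pre_ excludes exactly the inputs where `the_list[index]` raises IndexError in A.
def Pre_repeat_at_index (the_list : List Int) (index : Int) : Prop :=
  PySem.Raise.InRange the_list.length index
instance (the_list : List Int) (index : Int) : Decidable (Pre_repeat_at_index the_list index) := by unfold Pre_repeat_at_index; infer_instance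

def pvWitness_repeat_at_index : List Int × Int := ([3, 1, 4], -2)

def Spec_repeat_at_index (the_list : List Int) (index : Int) (out : List Int) : Prop := out = repeat_at_index_alt the_list index
instance (the_list : List Int) (index : Int) (out : List Int) : Decidable (Spec_repeat_at_index the_list index out) := by unfold Spec_repeat_at_index; infer_instance

-- ===== CLAIM (what is proved, stated in full; the proofs are below) =====
def Claim_equal_repeat_at_index : Prop := ∀ (the_list : List Int) (index : Int), Dom_repeat_at_index the_list index → Pre_repeat_at_index the_list index → Spec_repeat_at_index the_list index (repeat_at_index the_list index)

-- ===== LEMMAS AND PROOFS =====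

theorem insert_neg_pos (xs : List Int) (i v : Int) (h1 : i < 0) (h2 : 0 ≤ (xs.length : Int) + i) :
    PySem.List.insert xs i v
      = xs.take ((xs.length : Int) + i).toNat ++ v :: xs.drop ((xs.length : Int) + i).toNat := by
  simp [PySem.List.insert, PySem.List.sliceIndices, h1]
  rw [show (max (i + (xs.length : Int)) 0).toNat = ((xs.length : Int) + i).toNat from by omega]

theorem slice_to_neg' (xs : List Int) (i : Int) (h1 : i < 0) :
    PySem.List.slice xs none (some i) = xs.take ((xs.length : Int) + i).toNat := by
  simp [PySem.List.slice, PySem.List.clampIdx, h1]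
  split_ifs <;> omega

theorem slice_from_neg' (xs : List Int) (i : Int) (h1 : i < 0) (h2 : 0 ≤ (xs.length : Int) + i) :
    PySem.List.slice xs (some i) none = xs.drop ((xs.length : Int) + i).toNat := by
  have h3 : ¬ ((xs.length : Int) + i < 0) := by omega
  simp [PySem.List.slice, PySem.List.clampIdx, h1, h3]

theorem double_insert (xs : List Int) (i v : Int)
    (h : PySem.Raise.InRange xs.length i) :
    pvInsertLoop i v 2 xs
      = PySem.List.slice xs none (some i) ++ v :: v ::
          PySem.List.slice xs (some i) none := by
  obtain ⟨hlo, hhi⟩ := h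
  simp only [pvInsertLoop]
  by_cases hi : 0 ≤ i
  · obtain ⟨p, rfl⟩ := Int.eq_ofNat_of_zero_le hi
    have hplen : p ≤ xs.length := by omega
    have hlen1 : (xs.take p).length = p := by simp [hplen]
    rw [PySem.List.insert_natCast xs p v hplen,
        PySem.List.insert_natCast _ p v (by simp [hlen1]; omega),
        List.take_left' hlen1, List.drop_left' hlen1,
        PySem.List.slice_to_natCast, PySem.List.slice_from_natCast]
  · have h1 : i < 0 := by omega
    have h2 : 0 ≤ (xs.length : Int) + i := by omega
    set q := ((xs.length : Int) + i).toNat with hq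
    have hqlen : q ≤ xs.length := by omega
    have hlen1 : (xs.take q).length = q := by simp [hqlen]
    rw [insert_neg_pos xs i v h1 h2]
    rw [insert_neg_pos _ i v h1 (by simp [hlen1]; omega)]
    rw [slice_to_neg' xs i h1, slice_from_neg' xs i h1 h2, ← hq]
    have hlen2 : ((((xs.take q ++ v :: xs.drop q).length : Int)) + i).toNat = q + 1 := by
      simp [hlen1]; omega
    rw [hlen2]
    rw [show q + 1 = (xs.take q).length + 1 from by rw [hlen1]]
    have t1 : List.take (q + 1) (xs.take q) = xs.take q :=
      List.take_of_length_le (by rw [hlen1]; omega)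
    have t2 : List.drop (q + 1) (xs.take q) = [] :=
      List.drop_eq_nil_of_le (by rw [hlen1]; omega)
    rw [List.take_append, List.drop_append, hlen1, t1, t2]
    simp

-- ===== VERDICT (by name: the statement is the Claim_ definition above) =====
theorem repeat_at_index_spec : Claim_equal_repeat_at_index := by
  intro the_list index _hdom hpre
  unfold Spec_repeat_at_index repeat_at_index repeat_at_index_alt
  simpa using double_insert the_list index (PySem.List.pyGetD the_list index 0) hpre
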